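-- pv_equiv track=rewrite | github.com/mratet/advent-of-code_python | solutions/2023/day_23/clean_solution.py | _parse
-- ===== SOURCE A (Python) =====
-- def _parse(grid):
--     start = (0, grid[0].index("."))
--     end = (len(grid) - 1, grid[-1].index("."))
--
--     points = [start, end]
--
--     for r, row in enumerate(grid):
--         for c, ch in enumerate(row):
--             if ch == "#":
--                 continue
--             neighbors = 0
--             for nr, nc in [(r - 1, c), (r + 1, c), (r, c - 1), (r, c + 1)]:
--                 if (
--                     0 <= nr < len(grid)
--                     and 0 <= nc < len(grid[0])
--                     and grid[nr][nc] != "#"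
--                 ):
--                     neighbors += 1
--             if neighbors >= 3:
--                 points.append((r, c))
--     return start, end, points
-- ===== SOURCE B (Python) =====
-- def _parse(grid):
--     start = (0, grid[0].index("."))
--     end = (len(grid) - 1, grid[-1].index("."))
--
--     h, w = len(grid), len(grid[0])
--
--     # one pass over right/down edges: each open adjacency bumps both endpoints
--     bumps = []
--     for r in range(h):
--         for c in range(w):
--             if grid[r][c] == "#":
--                 continue
--             if c + 1 < w and grid[r][c + 1] != "#":
--                 bumps += [(r, c), (r, c + 1)]
--             if r + 1 < h and grid[r + 1][c] != "#":
--                 bumps += [(r, c), (r + 1, c)]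
--     deg = {}
--     for p in bumps:
--         deg[p] = deg.get(p, 0) + 1
--
--     points = [start, end]
--     for r in range(h):
--         for c in range(w):
--             if grid[r][c] != "#" and deg.get((r, c), 0) >= 3:
--                 points.append((r, c))
--     return start, end, points
-- ===== Notes on version B (the rewrite author's own statement) =====
-- stated objective: alternative
-- what changed: Replaces A's per-cell scan of all four neighbours (with bounds checks on each) by an edge-accumulation pass that walks only right/down adjacencies once, bumping a degree dictionary for both endpoints, followed by a second row-major pass that emits cells of degree >= 3.
-- outside the precondition, e.g. on _parse(['.#', '#', '.#']): A returns ((0, 0), (2, 0), [(0, 0), (2, 0)]), B raises IndexError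
import Mathlib
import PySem

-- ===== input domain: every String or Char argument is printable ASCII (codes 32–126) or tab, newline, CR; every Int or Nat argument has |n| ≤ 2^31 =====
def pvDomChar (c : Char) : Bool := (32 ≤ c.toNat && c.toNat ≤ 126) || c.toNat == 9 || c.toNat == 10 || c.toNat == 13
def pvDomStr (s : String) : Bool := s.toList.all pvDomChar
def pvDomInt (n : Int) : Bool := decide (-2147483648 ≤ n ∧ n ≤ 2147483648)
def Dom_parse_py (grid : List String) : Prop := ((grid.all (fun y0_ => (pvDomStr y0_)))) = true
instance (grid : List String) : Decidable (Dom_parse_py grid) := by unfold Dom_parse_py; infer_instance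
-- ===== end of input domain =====

-- One honest line: B replaces A's per-cell 4-neighbour bounds-checked scan by a single
-- right/down edge-accumulation pass into a degree dictionary plus a second row-major emit pass.

-- ===== PORT A =====
-- grid[i][j], total form: both ports read it only at positions Python reads (in range under Pre_)
def cellB (grid : List String) (i j : Int) : Char :=
  (PySem.List.pyGet? ((PySem.List.pyGet? grid i).getD "").toList j).getD '#'

-- A's guard: 0 <= nr < len(grid) and 0 <= nc < len(grid[0]) and grid[nr][nc] != '#'
def openA (grid : List String) (nr nc : Int) : Bool :=
  if 0 ≤ nr ∧ nr < (grid.length : Int) ∧ 0 ≤ nc ∧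
     nc < (((PySem.List.pyGet? grid 0).getD "").toList.length : Int) then
    decide (cellB grid nr nc ≠ '#')
  else false

def parse_py (grid : List String) : (Int × Int) × (Int × Int) × (List (Int × Int)) :=
  let start : Int × Int := (0, PySem.Str.find ((PySem.List.pyGet? grid 0).getD "") ".")
  let fin : Int × Int :=
    ((grid.length : Int) - 1, PySem.Str.find ((PySem.List.pyGet? grid (-1)).getD "") ".")
  let points :=
    (PySem.List.enumerate grid 0).foldl (fun pts rrow =>
      (PySem.List.enumerate rrow.2.toList 0).foldl (fun pts cch =>
        if cch.2 = '#' then pts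
        else
          let neighbors : Int :=
            [(rrow.1 - 1, cch.1), (rrow.1 + 1, cch.1),
             (rrow.1, cch.1 - 1), (rrow.1, cch.1 + 1)].foldl
              (fun n p => if openA grid p.1 p.2 then n + 1 else n) 0
          if 3 ≤ neighbors then pts ++ [(rrow.1, cch.1)] else pts) pts)
      [start, fin]
  (start, fin, points)

-- ===== PORT B =====
-- the two += of B's edge pass for one open cell (r, c)
def bumpsAt (grid : List String) (h w r c : Int) : List (Int × Int) :=
  (if c + 1 < w ∧ cellB grid r (c + 1) ≠ '#' then [(r, c), (r, c + 1)] else []) ++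
  (if r + 1 < h ∧ cellB grid (r + 1) c ≠ '#' then [(r, c), (r + 1, c)] else [])

def parse_py_alt (grid : List String) : (Int × Int) × (Int × Int) × (List (Int × Int)) :=
  let start : Int × Int := (0, PySem.Str.find ((PySem.List.pyGet? grid 0).getD "") ".")
  let fin : Int × Int :=
    ((grid.length : Int) - 1, PySem.Str.find ((PySem.List.pyGet? grid (-1)).getD "") ".")
  let h : Int := grid.length
  let w : Int := ((PySem.List.pyGet? grid 0).getD "").toList.length
  let bumps :=
    (PySem.List.pyRange 0 h 1).foldl (fun acc r =>
      (PySem.List.pyRange 0 w 1).foldl (fun acc c =>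
        if cellB grid r c = '#' then acc else acc ++ bumpsAt grid h w r c) acc) []
  let deg : PySem.Dict (Int × Int) Int :=
    bumps.foldl (fun d p => d.insert p (d.getD p 0 + 1)) PySem.Dict.empty
  let points :=
    (PySem.List.pyRange 0 h 1).foldl (fun pts r =>
      (PySem.List.pyRange 0 w 1).foldl (fun pts c =>
        if cellB grid r c ≠ '#' ∧ 3 ≤ deg.getD (r, c) 0 then pts ++ [(r, c)] else pts) pts)
      [start, fin]
  (start, fin, points)

-- ===== PRECONDITION & SPEC =====
-- Pre_ excludes inputs where A raises (empty grid, no '.' in first/last row: IndexError/ValueError)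
-- and grids with a row shorter than the first row: there A raises IndexError on most inputs and
-- B's natural column loop over range(len(grid[0])) raises IndexError on all of them.
def Pre_parse_py (grid : List String) : Prop :=
  grid ≠ [] ∧ (∀ s ∈ grid, grid.headI.toList.length ≤ s.toList.length) ∧
  '.' ∈ grid.headI.toList ∧ '.' ∈ (grid.getLast?.getD "").toList
instance (grid : List String) : Decidable (Pre_parse_py grid) := by
  unfold Pre_parse_py; infer_instance

def pvWitness_parse_py : List String := ["#.#", "...", "#.#"]

def Spec_parse_py (grid : List String) (out : (Int × Int) × (Int × Int) × (List (Int × Int))) : Prop := out = parse_py_alt grid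
instance (grid : List String) (out : (Int × Int) × (Int × Int) × (List (Int × Int))) : Decidable (Spec_parse_py grid out) := by unfold Spec_parse_py; infer_instance

-- ===== CLAIM (what is proved, stated in full; the proofs are below) =====
def Claim_equal_parse_py : Prop := ∀ (grid : List String), Dom_parse_py grid → Pre_parse_py grid → Spec_parse_py grid (parse_py grid)

-- ===== LEMMAS AND PROOFS =====

-- abbreviations used by the proofs (h, w, row 0 as A reads it)
def hI (grid : List String) : Int := grid.length
def wI (grid : List String) : Int := (((PySem.List.pyGet? grid 0).getD "").toList.length : Int)

-- one open right/down adjacency source cell of B's edge pass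
def contrib (grid : List String) (i j : Int) : List (Int × Int) :=
  if cellB grid i j = '#' then [] else bumpsAt grid (hI grid) (wI grid) i j

-- the flatMap form of B's accumulated bump list
def bumpsL (grid : List String) : List (Int × Int) :=
  (PySem.List.pyRange 0 (hI grid)).flatMap (fun r =>
    (PySem.List.pyRange 0 (wI grid)).flatMap (fun c => contrib grid r c))

-- the value of A's 4-neighbour fold
def nbr (grid : List String) (r c : Int) : Int :=
  (if openA grid (r - 1) c then (1:Int) else 0) + (if openA grid (r + 1) c then 1 else 0) +
  (if openA grid r (c - 1) then 1 else 0) + (if openA grid r (c + 1) then 1 else 0)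

lemma foldl4_eq_nbr (grid : List String) (r c : Int) :
    [(r - 1, c), (r + 1, c), (r, c - 1), (r, c + 1)].foldl
      (fun n p => if openA grid p.1 p.2 then n + 1 else n) (0:Int) = nbr grid r c := by
  simp only [List.foldl, nbr]
  split_ifs <;> ring

lemma foldl_ite1_append {α β : Type} (p : α → Prop) [DecidablePred p] (f : α → β)
    (l : List α) (acc : List β) :
    l.foldl (fun acc x => if p x then acc ++ [f x] else acc) acc
      = acc ++ (l.filter (fun x => decide (p x))).map f := by
  induction l generalizing acc with
  | nil => simp
  | cons x xs ih =>
    simp only [List.foldl_cons, List.filter_cons]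
    by_cases h : p x <;> simp [h, ih]

lemma foldl_ite2_append {α β : Type} (p q : α → Prop) [DecidablePred p] [DecidablePred q]
    (f : α → β) (l : List α) (acc : List β) :
    l.foldl (fun acc x => if p x then acc else if q x then acc ++ [f x] else acc) acc
      = acc ++ (l.filter (fun x => decide (¬ p x ∧ q x))).map f := by
  induction l generalizing acc with
  | nil => simp
  | cons x xs ih =>
    simp only [List.foldl_cons, List.filter_cons]
    by_cases h : p x <;> by_cases h2 : q x <;> simp [h, h2, ih]

lemma foldl_skip_append {α β : Type} (p : α → Prop) [DecidablePred p] (g : α → List β)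
    (l : List α) (acc : List β) :
    l.foldl (fun acc x => if p x then acc else acc ++ g x) acc
      = acc ++ l.flatMap (fun x => if p x then [] else g x) := by
  induction l generalizing acc with
  | nil => simp
  | cons x xs ih =>
    simp only [List.foldl_cons, List.flatMap_cons]
    by_cases h : p x <;> simp [h, ih]

lemma count_flatMap {α β : Type} [BEq β] (l : List α) (f : α → List β) (a : β) :
    (l.flatMap f).count a = (l.map (fun x => (f x).count a)).sum := by
  induction l with
  | nil => simp
  | cons x xs ih => simp [List.count_append, ih]

lemma sum_map_eq_zero {α : Type} (l : List α) (g : α → Nat)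
    (h0 : ∀ x ∈ l, g x = 0) : (l.map g).sum = 0 := by
  induction l with
  | nil => simp
  | cons x xs ih =>
    simp only [List.map_cons, List.sum_cons, h0 x (by simp)]
    rw [ih (fun y hy => h0 y (by simp [hy]))]

lemma sum_map_support1 {α : Type} [DecidableEq α] (l : List α) (g : α → Nat) (i : α)
    (hnd : l.Nodup) (hi : i ∈ l) (h0 : ∀ x ∈ l, x ≠ i → g x = 0) :
    (l.map g).sum = g i := by
  induction l with
  | nil => simp at hi
  | cons x xs ih =>
    rcases List.mem_cons.mp hi with h | h
    · subst h
      simp only [List.map_cons, List.sum_cons]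
      have : (xs.map g).sum = 0 := sum_map_eq_zero xs g (fun y hy =>
        h0 y (by simp [hy]) (fun hxy => (List.nodup_cons.mp hnd).1 (hxy ▸ hy)))
      omega
    · have hx : g x = 0 := h0 x (by simp) (fun hxy => (List.nodup_cons.mp hnd).1 (hxy ▸ h))
      simp only [List.map_cons, List.sum_cons, hx]
      rw [ih (List.nodup_cons.mp hnd).2 h (fun y hy hyne => h0 y (by simp [hy]) hyne)]
      omega

lemma sum_map_support2 {α : Type} [DecidableEq α] (l : List α) (g : α → Nat) (i j : α)
    (hnd : l.Nodup) (hij : i ≠ j) (hi : i ∈ l) (hj : j ∈ l)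
    (h0 : ∀ x ∈ l, x ≠ i → x ≠ j → g x = 0) :
    (l.map g).sum = g i + g j := by
  induction l with
  | nil => simp at hi
  | cons x xs ih =>
    have hnd' := List.nodup_cons.mp hnd
    rcases List.mem_cons.mp hi with h | h
    · subst h
      have hj' : j ∈ xs := by
        rcases List.mem_cons.mp hj with h' | h'
        · exact absurd h'.symm hij
        · exact h'
      simp only [List.map_cons, List.sum_cons]
      rw [sum_map_support1 xs g j hnd'.2 hj' (fun y hy hyne =>
        h0 y (by simp [hy]) (fun hyx => hnd'.1 (hyx ▸ hy)) hyne)]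
    · rcases List.mem_cons.mp hj with h' | h'
      · subst h'
        have hi' : i ∈ xs := h
        simp only [List.map_cons, List.sum_cons]
        rw [sum_map_support1 xs g i hnd'.2 hi' (fun y hy hyne =>
          h0 y (by simp [hy]) hyne (fun hyx => hnd'.1 (hyx ▸ hy)))]
        omega
      · have hx : g x = 0 := h0 x (by simp)
          (fun hxy => hnd'.1 (hxy ▸ h)) (fun hxy => hnd'.1 (hxy ▸ h'))
        simp only [List.map_cons, List.sum_cons, hx]
        rw [ih hnd'.2 h h' (fun y hy => h0 y (by simp [hy]))]
        omega

lemma openA_iff (grid : List String) (i j : Int) :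
    openA grid i j = true ↔
      (0 ≤ i ∧ i < hI grid ∧ 0 ≤ j ∧ j < wI grid ∧ cellB grid i j ≠ '#') := by
  unfold openA hI wI
  split_ifs with h
  · simp only [decide_eq_true_eq]
    exact ⟨fun hc => ⟨h.1, h.2.1, h.2.2.1, h.2.2.2, hc⟩, fun hc => hc.2.2.2.2⟩
  · simp only [false_iff]
    intro hc
    exact h ⟨hc.1, hc.2.1, hc.2.2.1, hc.2.2.2.1⟩

lemma count_contrib_self (grid : List String) (r c : Int)
    (hopen : cellB grid r c ≠ '#') :
    (contrib grid r c).count (r, c)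
      = (if c + 1 < wI grid ∧ cellB grid r (c + 1) ≠ '#' then 1 else 0)
        + (if r + 1 < hI grid ∧ cellB grid (r + 1) c ≠ '#' then 1 else 0) := by
  simp only [contrib, bumpsAt, if_neg hopen, List.count_append]
  split_ifs <;> simp_all [List.count_nil, Prod.mk.injEq]
lemma count_contrib_left (grid : List String) (r c : Int)
    (hcw : c < wI grid) (hopen : cellB grid r c ≠ '#') :
    (contrib grid r (c - 1)).count (r, c)
      = (if cellB grid r (c - 1) ≠ '#' then 1 else 0) := by
  simp only [contrib, bumpsAt, sub_add_cancel]
  split_ifs <;> simp_all [List.count_nil, Prod.mk.injEq]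

lemma count_contrib_up (grid : List String) (r c : Int)
    (hrh : r < hI grid) (hopen : cellB grid r c ≠ '#') :
    (contrib grid (r - 1) c).count (r, c)
      = (if cellB grid (r - 1) c ≠ '#' then 1 else 0) := by
  simp only [contrib, bumpsAt, sub_add_cancel]
  split_ifs <;> simp_all [List.count_nil, Prod.mk.injEq]

lemma count_contrib_other (grid : List String) (r c i j : Int)
    (h1 : ¬ (i = r ∧ j = c)) (h2 : ¬ (i = r ∧ j = c - 1)) (h3 : ¬ (i = r - 1 ∧ j = c)) :
    (contrib grid i j).count (r, c) = 0 := by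
  simp only [contrib, bumpsAt, List.count_append]
  split_ifs <;> simp_all [List.count_cons, List.count_nil, Prod.mk.injEq] <;> omega
-- beyond column w-1 = len(grid[0]) - 1 a cell of a longer row has at most one in-bounds
-- neighbour, so A never appends it
lemma nbr_small (grid : List String) (r c : Int) (hcw : wI grid ≤ c) :
    nbr grid r c ≤ 1 := by
  have h1 : ¬ openA grid (r - 1) c = true := fun hb => by
    have := (openA_iff grid (r - 1) c).mp hb; omega
  have h2 : ¬ openA grid (r + 1) c = true := fun hb => by
    have := (openA_iff grid (r + 1) c).mp hb; omega
  have h4 : ¬ openA grid r (c + 1) = true := fun hb => by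
    have := (openA_iff grid r (c + 1)).mp hb; omega
  unfold nbr
  rw [if_neg h1, if_neg h2, if_neg h4]
  split_ifs <;> omega

lemma count_bumps (grid : List String) (r c : Int)
    (hr0 : 0 ≤ r) (hrh : r < hI grid) (hc0 : 0 ≤ c) (hcw : c < wI grid)
    (hopen : cellB grid r c ≠ '#') :
    ((bumpsL grid).count (r, c) : Int) = nbr grid r c := by
  have hnodh := PySem.List.nodup_pyRange_one 0 (hI grid)
  have hnodw := PySem.List.nodup_pyRange_one 0 (wI grid)
  have hrowr : ((PySem.List.pyRange 0 (wI grid)).map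
      (fun j => (contrib grid r j).count (r, c))).sum
      = (if 1 ≤ c ∧ cellB grid r (c - 1) ≠ '#' then 1 else 0)
        + ((if c + 1 < wI grid ∧ cellB grid r (c + 1) ≠ '#' then 1 else 0)
          + (if r + 1 < hI grid ∧ cellB grid (r + 1) c ≠ '#' then 1 else 0)) := by
    by_cases hc1 : 1 ≤ c
    · rw [sum_map_support2 _ _ (c - 1) c hnodw (by omega)
        (PySem.List.mem_pyRange_one.mpr (by omega))
        (PySem.List.mem_pyRange_one.mpr (by omega))
        (fun x hx hx1 hx2 => count_contrib_other grid r c r x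
          (fun hh => hx2 hh.2) (fun hh => hx1 hh.2) (fun hh => by omega)),
        count_contrib_left grid r c hcw hopen, count_contrib_self grid r c hopen]
      simp [hc1]
    · rw [sum_map_support1 _ _ c hnodw
        (PySem.List.mem_pyRange_one.mpr (by omega))
        (fun x hx hx1 => count_contrib_other grid r c r x
          (fun hh => hx1 hh.2)
          (fun hh => by have := PySem.List.mem_pyRange_one.mp hx; omega)
          (fun hh => by omega)),
        count_contrib_self grid r c hopen]
      simp [show ¬ (1 ≤ c ∧ cellB grid r (c - 1) ≠ '#') from fun hh => hc1 hh.1]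
  have hrowu : ∀ i : Int, i = r - 1 → ((PySem.List.pyRange 0 (wI grid)).map
      (fun j => (contrib grid i j).count (r, c))).sum
      = (if cellB grid (r - 1) c ≠ '#' then 1 else 0) := by
    intro i hi; subst hi
    rw [sum_map_support1 _ _ c hnodw
      (PySem.List.mem_pyRange_one.mpr (by omega))
      (fun x hx hx1 => count_contrib_other grid r c (r - 1) x
        (fun hh => by omega) (fun hh => by omega) (fun hh => hx1 hh.2)),
      count_contrib_up grid r c hrh hopen]
  have hrow0 : ∀ i : Int, i ≠ r → i ≠ r - 1 → ((PySem.List.pyRange 0 (wI grid)).map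
      (fun j => (contrib grid i j).count (r, c))).sum = 0 := by
    intro i hi1 hi2
    exact sum_map_eq_zero _ _ (fun x hx => count_contrib_other grid r c i x
      (fun hh => hi1 hh.1) (fun hh => hi1 hh.1) (fun hh => hi2 hh.1))
  have hcount : (bumpsL grid).count (r, c)
      = (if 1 ≤ r ∧ cellB grid (r - 1) c ≠ '#' then 1 else 0)
        + ((if 1 ≤ c ∧ cellB grid r (c - 1) ≠ '#' then 1 else 0)
          + ((if c + 1 < wI grid ∧ cellB grid r (c + 1) ≠ '#' then 1 else 0)
            + (if r + 1 < hI grid ∧ cellB grid (r + 1) c ≠ '#' then 1 else 0))) := by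
    simp only [bumpsL, count_flatMap]
    by_cases hr1 : 1 ≤ r
    · rw [sum_map_support2 _ _ (r - 1) r hnodh (by omega)
        (PySem.List.mem_pyRange_one.mpr (by omega))
        (PySem.List.mem_pyRange_one.mpr (by omega))
        (fun x hx hx1 hx2 => hrow0 x hx2 hx1),
        hrowu (r - 1) rfl, hrowr]
      simp [hr1]
    · rw [sum_map_support1 _ _ r hnodh
        (PySem.List.mem_pyRange_one.mpr (by omega))
        (fun x hx hx1 => hrow0 x hx1
          (by have := PySem.List.mem_pyRange_one.mp hx; omega)), hrowr]
      simp [show ¬ (1 ≤ r ∧ cellB grid (r - 1) c ≠ '#') from fun hh => hr1 hh.1]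
  have e1 : (if openA grid (r - 1) c then (1:Int) else 0)
      = (if 1 ≤ r ∧ cellB grid (r - 1) c ≠ '#' then 1 else 0) := by
    by_cases hb : openA grid (r - 1) c = true
    · have h' := (openA_iff grid (r - 1) c).mp hb
      rw [if_pos hb, if_pos ⟨by omega, h'.2.2.2.2⟩]
    · have h2 : ¬ (1 ≤ r ∧ cellB grid (r - 1) c ≠ '#') := fun hh =>
        hb ((openA_iff grid (r - 1) c).mpr ⟨by omega, by omega, hc0, hcw, hh.2⟩)
      simp [hb, h2]
  have e2 : (if openA grid (r + 1) c then (1:Int) else 0)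
      = (if r + 1 < hI grid ∧ cellB grid (r + 1) c ≠ '#' then 1 else 0) := by
    by_cases hb : openA grid (r + 1) c = true
    · have h' := (openA_iff grid (r + 1) c).mp hb
      rw [if_pos hb, if_pos ⟨h'.2.1, h'.2.2.2.2⟩]
    · have h2 : ¬ (r + 1 < hI grid ∧ cellB grid (r + 1) c ≠ '#') := fun hh =>
        hb ((openA_iff grid (r + 1) c).mpr ⟨by omega, hh.1, hc0, hcw, hh.2⟩)
      simp [hb, h2]
  have e3 : (if openA grid r (c - 1) then (1:Int) else 0)
      = (if 1 ≤ c ∧ cellB grid r (c - 1) ≠ '#' then 1 else 0) := by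
    by_cases hb : openA grid r (c - 1) = true
    · have h' := (openA_iff grid r (c - 1)).mp hb
      rw [if_pos hb, if_pos ⟨by omega, h'.2.2.2.2⟩]
    · have h2 : ¬ (1 ≤ c ∧ cellB grid r (c - 1) ≠ '#') := fun hh =>
        hb ((openA_iff grid r (c - 1)).mpr ⟨hr0, hrh, by omega, by omega, hh.2⟩)
      simp [hb, h2]
  have e4 : (if openA grid r (c + 1) then (1:Int) else 0)
      = (if c + 1 < wI grid ∧ cellB grid r (c + 1) ≠ '#' then 1 else 0) := by
    by_cases hb : openA grid r (c + 1) = true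
    · have h' := (openA_iff grid r (c + 1)).mp hb
      rw [if_pos hb, if_pos ⟨h'.2.2.2.1, h'.2.2.2.2⟩]
    · have h2 : ¬ (c + 1 < wI grid ∧ cellB grid r (c + 1) ≠ '#') := fun hh =>
        hb ((openA_iff grid r (c + 1)).mpr ⟨hr0, hrh, by omega, hh.1, hh.2⟩)
      simp [hb, h2]
  rw [hcount, nbr, e1, e2, e3, e4]
  push_cast
  split_ifs <;> ring
lemma row0_eq (grid : List String) (hne : grid ≠ []) :
    (PySem.List.pyGet? grid 0).getD "" = grid.headI := by
  cases grid with
  | nil => exact absurd rfl hne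
  | cons x xs => rw [PySem.List.pyGet?_zero_cons]; rfl

lemma row_len_ge (grid : List String) (hne : grid ≠ [])
    (hrect : ∀ s ∈ grid, grid.headI.toList.length ≤ s.toList.length)
    (r : Int) (hr0 : 0 ≤ r) (hrh : r < hI grid) :
    wI grid ≤ ((PySem.List.pyGetD grid r "").toList.length : Int) := by
  have hrh' : r < (grid.length : Int) := hrh
  have hg : PySem.List.pyGet? grid r = some grid[r.toNat] :=
    PySem.List.pyGet?_eq_some_getElem grid hr0 hrh'
  unfold wI
  rw [row0_eq grid hne]
  rw [PySem.List.pyGetD, hg]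
  rw [Option.getD_some]
  have hmem := hrect grid[r.toNat] (List.getElem_mem _)
  exact_mod_cast hmem

lemma bumpsL_eq (grid : List String) :
    ((PySem.List.pyRange 0 (grid.length : Int)).flatMap (fun r =>
      (PySem.List.pyRange 0 ((((PySem.List.pyGet? grid 0).getD "").toList.length : Int))).flatMap
        (fun c => if cellB grid r c = '#' then [] else
          bumpsAt grid (grid.length : Int)
            ((((PySem.List.pyGet? grid 0).getD "").toList.length : Int)) r c)))
      = bumpsL grid := rfl

-- ===== VERDICT (by name: the statement is the Claim_ definition above) =====
set_option maxRecDepth 8000 in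
theorem parse_py_spec : Claim_equal_parse_py := by
  intro grid hDom hPre
  obtain ⟨hne, hrect, hdot1, hdot2⟩ := hPre
  unfold Spec_parse_py
  simp only [parse_py, parse_py_alt, foldl4_eq_nbr, foldl_ite2_append, foldl_ite1_append,
    foldl_skip_append, PySem.List.foldl_append_eq_flatMap, Prod.mk.injEq, true_and]
  rw [bumpsL_eq]
  simp only [PySem.Dict.getD_foldl_insert_add_one, PySem.Dict.getD_empty, zero_add]
  rw [PySem.List.enumerate_eq_map_pyRange grid "", List.flatMap_map]
  simp only [PySem.List.len]
  refine congrArg _ (List.flatMap_congr (fun r hr => ?_))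
  have hrb := PySem.List.mem_pyRange_one.mp hr
  rw [PySem.List.enumerate_eq_map_pyRange ((r, PySem.List.pyGetD grid r "").2.toList) '#',
    List.filter_map, List.map_map]
  simp only [PySem.List.len]
  simp only [Function.comp_def, List.nil_append]
  have hwle : wI grid ≤ (((PySem.List.pyGetD grid r "").toList.length : Int)) :=
    row_len_ge grid hne hrect r hrb.1 hrb.2
  rw [PySem.List.pyRange_one_append 0 (wI grid)
      (((PySem.List.pyGetD grid r "").toList.length : Int)) (Int.natCast_nonneg _) hwle,
    List.filter_append, List.map_append]
  have htail : List.filter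
      (fun x => decide (¬ (PySem.List.pyGetD (PySem.List.pyGetD grid r "").toList x '#') = '#'
        ∧ 3 ≤ nbr grid r x))
      (PySem.List.pyRange (wI grid) (((PySem.List.pyGetD grid r "").toList.length : Int))) = [] := by
    refine List.filter_eq_nil_iff.mpr (fun x hx => ?_)
    have hxb := PySem.List.mem_pyRange_one.mp hx
    have := nbr_small grid r x hxb.1
    simp only [decide_eq_true_eq, not_and, not_le]
    intro _
    omega
  rw [htail, List.map_nil, List.append_nil]
  have hpt : ∀ x ∈ PySem.List.pyRange 0 (wI grid),
      (decide (¬ (PySem.List.pyGetD (PySem.List.pyGetD grid r "").toList x '#') = '#'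
        ∧ 3 ≤ nbr grid r x))
      = (decide (cellB grid r x ≠ '#' ∧ 3 ≤ ((bumpsL grid).count (r, x) : Int))) := by
    intro c hc
    have hcb := PySem.List.mem_pyRange_one.mp hc
    have hcell : PySem.List.pyGetD (PySem.List.pyGetD grid r "").toList c '#'
        = cellB grid r c := rfl
    rw [hcell]
    refine decide_eq_decide.mpr ?_
    by_cases hopen : cellB grid r c = '#'
    · simp [hopen]
    · rw [count_bumps grid r c hrb.1 hrb.2 hcb.1 hcb.2 hopen]
  rw [show PySem.List.pyRange 0 (↑((PySem.List.pyGet? grid 0).getD "").toList.length)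
      = PySem.List.pyRange 0 (wI grid) from rfl]
  rw [List.filter_congr hpt]
  rfl
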